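-- pv_equiv track=rewrite | github.com/casperfibaek/buteo | buteo/utils/utils_gdal.py | _get_default_creation_options
-- ===== SOURCE A (Python) =====
-- from typing import Optional, Union, List, Any, Tuple
--
-- def _get_default_creation_options(
--     options: Optional[List[str]] = None,
-- ) -> List[str]:
--     """Takes a list of GDAL creation options and adds default values if not specified.
--
--     Default options are:
--     ```python
--     >>> default_options = [
--     ...     "TILED=YES",
--     ...     "NUM_THREADS=ALL_CPUS",
--     ...     "BIGTIFF=IF_SAFER",
--     ...     "COMPRESS=LZW",
--     ...     "BLOCKXSIZE=256",
--     ...     "BLOCKYSIZE=256",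
--     ... ]
--     ```
--
--     Parameters
--     ----------
--     options : Optional[List[str]], optional
--         A list of GDAL creation options. Default: None
--
--     Returns
--     -------
--     List[str]
--         A list of GDAL creation options with defaults added.
--
--     Raises
--     ------
--     TypeError
--         If options is not None or a list, or if any option is not a string.
--     """
--     if options is not None and not isinstance(options, list):
--         raise TypeError("options must be a list or None")
--
--     if options is not None and not all(isinstance(opt, str) for opt in options):
--         raise TypeError("all options must be strings")
--
--     internal_options = list(options) if options is not None else []
--     opt_str = " ".join(internal_options).upper()
--
--     default_pairs = [
--         ("TILED", "TILED=YES"),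
--         ("NUM_THREADS", "NUM_THREADS=ALL_CPUS"),
--         ("BIGTIFF", "BIGTIFF=IF_SAFER"),
--         ("COMPRESS", "COMPRESS=LZW"),
--         ("BLOCKXSIZE", "BLOCKXSIZE=256"),
--         ("BLOCKYSIZE", "BLOCKYSIZE=256"),
--     ]
--
--     for key, value in default_pairs:
--         if key not in opt_str:
--             internal_options.append(value)
--
--     return internal_options
-- ===== SOURCE B (Python) =====
-- from typing import Optional, List
--
-- def _get_default_creation_options(
--     options: Optional[List[str]] = None,
-- ) -> List[str]:
--     """Add default GDAL creation options for every default key not mentioned in any option."""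
--     if options is not None and not isinstance(options, list):
--         raise TypeError("options must be a list or None")
--     if options is not None and not all(isinstance(opt, str) for opt in options):
--         raise TypeError("all options must be strings")
--
--     internal_options = list(options) if options is not None else []
--
--     defaults = [
--         ("TILED", "TILED=YES"),
--         ("NUM_THREADS", "NUM_THREADS=ALL_CPUS"),
--         ("BIGTIFF", "BIGTIFF=IF_SAFER"),
--         ("COMPRESS", "COMPRESS=LZW"),
--         ("BLOCKXSIZE", "BLOCKXSIZE=256"),
--         ("BLOCKYSIZE", "BLOCKYSIZE=256"),
--     ]
--
--     # One pass over the user's options builds the SET of default keys already mentioned;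
--     # the defaults are then filtered by a set-membership lookup (no per-key rescans).
--     found = set()
--     for opt in internal_options:
--         u = opt.upper()
--         for key, _ in defaults:
--             if key in u:
--                 found.add(key)
--
--     return internal_options + [value for key, value in defaults if key not in found]
-- ===== Notes on version B (the rewrite author's own statement) =====
-- stated objective: alternative
-- what changed: B inverts A's traversal: instead of joining all options into one uppercased string and scanning it once per default key, B makes a single pass over the options building a set of default keys already mentioned, then emits the defaults whose key is absent from that set.
import Mathlib
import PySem

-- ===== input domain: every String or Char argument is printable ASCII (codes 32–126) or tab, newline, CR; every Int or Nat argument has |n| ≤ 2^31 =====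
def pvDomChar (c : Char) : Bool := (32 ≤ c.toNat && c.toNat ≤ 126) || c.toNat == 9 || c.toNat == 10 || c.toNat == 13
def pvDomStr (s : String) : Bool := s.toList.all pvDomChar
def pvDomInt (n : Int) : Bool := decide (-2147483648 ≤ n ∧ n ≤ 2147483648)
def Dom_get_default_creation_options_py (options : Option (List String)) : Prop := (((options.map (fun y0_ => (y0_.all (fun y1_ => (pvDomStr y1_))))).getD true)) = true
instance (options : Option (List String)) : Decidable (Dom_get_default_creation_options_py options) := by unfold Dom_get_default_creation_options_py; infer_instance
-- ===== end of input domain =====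

-- B inverts A's traversal: one pass over the options collects the SET of default keys already
-- mentioned, then the defaults are filtered by set membership (objective: alternative); same value.

-- default (key, value) pairs, shared verbatim by both programs
def pvDefaultPairs : List (String × String) :=
  [("TILED", "TILED=YES"),
   ("NUM_THREADS", "NUM_THREADS=ALL_CPUS"),
   ("BIGTIFF", "BIGTIFF=IF_SAFER"),
   ("COMPRESS", "COMPRESS=LZW"),
   ("BLOCKXSIZE", "BLOCKXSIZE=256"),
   ("BLOCKYSIZE", "BLOCKYSIZE=256")]

-- ===== PORT A =====
-- (the two isinstance guards of A cannot fire under the Lean types, so A is total here)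
def get_default_creation_options_py (options : Option (List String)) : List String :=
  let internal_options : List String := match options with | some l => l | none => []
  let opt_str : String := PySem.Str.upper (PySem.Str.join " " internal_options)
  pvDefaultPairs.foldl
    (fun acc kv => if !(PySem.Str.isIn kv.1 opt_str) then acc ++ [kv.2] else acc)
    internal_options

-- ===== PORT B =====
def get_default_creation_options_py_alt (options : Option (List String)) : List String :=
  let internal_options : List String := match options with | some l => l | none => []
  let found : PySem.Set String :=
    internal_options.foldl
      (fun s opt =>
        let u := PySem.Str.upper opt
        pvDefaultPairs.foldl
          (fun s kv => if PySem.Str.isIn kv.1 u then PySem.Set.add s kv.1 else s) s)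
      PySem.Set.empty
  internal_options ++
    (pvDefaultPairs.filter (fun kv => !(PySem.Set.contains found kv.1))).map Prod.snd

-- ===== PRECONDITION & SPEC =====
def Spec_get_default_creation_options_py (options : Option (List String)) (out : List String) : Prop := out = get_default_creation_options_py_alt options
instance (options : Option (List String)) (out : List String) : Decidable (Spec_get_default_creation_options_py options out) := by unfold Spec_get_default_creation_options_py; infer_instance

-- ===== CLAIM (what is proved, stated in full; the proofs are below) =====
def Claim_equal_get_default_creation_options_py : Prop := ∀ (options : Option (List String)), Dom_get_default_creation_options_py options → Spec_get_default_creation_options_py options (get_default_creation_options_py options)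

-- ===== LEMMAS AND PROOFS =====

-- uppercasing distributes over the space-separated join (space is fixed by upper)
lemma pv_upper_join (xs : List (List Char)) :
    PySem.Chars.upper (PySem.Chars.join [' '] xs)
      = PySem.Chars.join [' '] (xs.map PySem.Chars.upper) := by
  induction xs with
  | nil => simp [PySem.Chars.join_nil, PySem.Chars.upper]
  | cons a tl ih =>
    cases tl with
    | nil => simp [PySem.Chars.join_singleton]
    | cons b rest =>
      have h1 : PySem.Chars.join [' '] (a :: b :: rest)
          = a ++ ' ' :: PySem.Chars.join [' '] (b :: rest) := by
        rw [PySem.Chars.join_cons_cons]; simp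
      have h2 : PySem.Chars.join [' '] ((a :: b :: rest).map PySem.Chars.upper)
          = PySem.Chars.upper a ++ ' ' :: PySem.Chars.join [' '] ((b :: rest).map PySem.Chars.upper) := by
        simp only [List.map_cons]; rw [PySem.Chars.join_cons_cons]; simp
      rw [h1, h2, ← ih]
      have hsp : PySem.Chars.upperChar ' ' = ' ' := by decide
      simp [PySem.Chars.upper, hsp]

-- a space-free prefix of `u ++ ' ' :: t` cannot reach the separator, so it is a prefix of u
lemma pv_prefix_sep {sub u t : List Char} (hsp : ' ' ∉ sub)
    (h : sub <+: u ++ ' ' :: t) : sub <+: u := by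
  have hs := List.prefix_iff_eq_take.mp h
  rw [List.take_append] at hs
  by_cases hle : sub.length ≤ u.length
  · rw [Nat.sub_eq_zero_of_le hle] at hs
    simp only [List.take_zero, List.append_nil] at hs
    rw [hs]; exact List.take_prefix _ _
  · exfalso
    apply hsp
    rw [hs]
    refine List.mem_append.mpr (Or.inr ?_)
    cases hn : sub.length - u.length with
    | zero => omega
    | succ m => simp [List.take]

-- occurrence of a nonempty space-free pattern in `u ++ ' ' :: t` splits over the separator
lemma pv_isIn_sep {sub : List Char} (hsp : ' ' ∉ sub) (hne : sub ≠ []) (u t : List Char) :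
    PySem.Chars.isIn sub (u ++ ' ' :: t)
      = (PySem.Chars.isIn sub u || PySem.Chars.isIn sub t) := by
  by_cases h : PySem.Chars.isIn sub (u ++ ' ' :: t) = true
  · rw [h]
    obtain ⟨j, hj⟩ := (PySem.Chars.exists_prefix_drop_iff_isIn sub _).mpr h
    rw [List.drop_append] at hj
    by_cases hle : j ≤ u.length
    · rw [Nat.sub_eq_zero_of_le hle] at hj
      simp only [List.drop_zero] at hj
      have hu : PySem.Chars.isIn sub u = true :=
        (PySem.Chars.exists_prefix_drop_iff_isIn sub u).mp ⟨j, pv_prefix_sep hsp hj⟩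
      rw [hu]; simp
    · have hdu : u.drop j = [] := List.drop_eq_nil_of_le (by omega)
      rw [hdu, List.nil_append] at hj
      have ht : PySem.Chars.isIn sub t = true := by
        apply (PySem.Chars.exists_prefix_drop_iff_isIn sub t).mp
        refine ⟨j - u.length - 1, ?_⟩
        have : (' ' :: t).drop (j - u.length) = t.drop (j - u.length - 1) := by
          cases hn : j - u.length with
          | zero => omega
          | succ m => simp [List.drop]
        rwa [this] at hj
      rw [ht]; simp
  · have hf : PySem.Chars.isIn sub (u ++ ' ' :: t) = false := by
      cases hx : PySem.Chars.isIn sub (u ++ ' ' :: t) with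
      | true => exact absurd hx h
      | false => rfl
    rw [hf]
    have hu : PySem.Chars.isIn sub u = false := by
      cases hx : PySem.Chars.isIn sub u with
      | false => rfl
      | true =>
        exfalso; apply h
        obtain ⟨j, hj⟩ := (PySem.Chars.exists_prefix_drop_iff_isIn sub u).mpr hx
        apply (PySem.Chars.exists_prefix_drop_iff_isIn sub _).mp
        by_cases hle : j ≤ u.length
        · refine ⟨j, ?_⟩
          rw [List.drop_append, Nat.sub_eq_zero_of_le hle]
          simp only [List.drop_zero]
          exact hj.trans (List.prefix_append _ _)
        · exfalso
          rw [List.drop_eq_nil_of_le (by omega)] at hj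
          exact hne (List.prefix_nil.mp hj)
    have ht : PySem.Chars.isIn sub t = false := by
      cases hx : PySem.Chars.isIn sub t with
      | false => rfl
      | true =>
        exfalso; apply h
        obtain ⟨j, hj⟩ := (PySem.Chars.exists_prefix_drop_iff_isIn sub t).mpr hx
        apply (PySem.Chars.exists_prefix_drop_iff_isIn sub _).mp
        refine ⟨u.length + 1 + j, ?_⟩
        rw [List.drop_append, List.drop_eq_nil_of_le (by omega)]
        have : (' ' :: t).drop (u.length + 1 + j - u.length) = t.drop j := by
          have : u.length + 1 + j - u.length = j + 1 := by omega
          rw [this]; simp [List.drop]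
        rw [this]; simpa using hj
    rw [hu, ht]; rfl

-- a nonempty space-free pattern occurs in the space-join iff it occurs in some element
lemma pv_isIn_join {sub : List Char} (hsp : ' ' ∉ sub) (hne : sub ≠ []) (xs : List (List Char)) :
    PySem.Chars.isIn sub (PySem.Chars.join [' '] xs)
      = xs.any (fun x => PySem.Chars.isIn sub x) := by
  induction xs with
  | nil =>
    rw [PySem.Chars.join_nil]
    simp [PySem.Chars.isIn_eq_false_iff, List.infix_nil, hne]
  | cons a tl ih =>
    cases tl with
    | nil => simp [PySem.Chars.join_singleton]
    | cons b rest =>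
      have h1 : PySem.Chars.join [' '] (a :: b :: rest)
          = a ++ ' ' :: PySem.Chars.join [' '] (b :: rest) := by
        rw [PySem.Chars.join_cons_cons]; simp
      rw [h1, pv_isIn_sep hsp hne, ih]
      simp

-- string-level: key in upper(" ".join(l)) iff key in upper(x) for some x in l
lemma pv_isIn_upper_join (key : String) (hsp : ' ' ∉ key.toList) (hne : key.toList ≠ [])
    (l : List String) :
    PySem.Str.isIn key (PySem.Str.upper (PySem.Str.join " " l))
      = l.any (fun x => PySem.Str.isIn key (PySem.Str.upper x)) := by
  have hsep : (" " : String).toList = [' '] := rfl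
  simp only [PySem.Str.isIn_eq, PySem.Str.toList_upper, PySem.Str.toList_join, hsep]
  rw [pv_upper_join, List.map_map, pv_isIn_join hsp hne]
  simp [List.any_map, Function.comp_def]

-- membership in the inner fold over the default pairs (one option's scan)
lemma pv_mem_inner (u : String) (ps : List (String × String)) (s : PySem.Set String) (x : String) :
    x ∈ ps.foldl (fun s kv => if PySem.Str.isIn kv.1 u then PySem.Set.add s kv.1 else s) s
      ↔ x ∈ s ∨ ∃ kv ∈ ps, PySem.Str.isIn kv.1 u = true ∧ x = kv.1 := by
  induction ps generalizing s with
  | nil => simp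
  | cons p tl ih =>
    rw [List.foldl_cons, ih]
    by_cases hp : PySem.Str.isIn p.1 u = true
    · rw [if_pos hp]
      constructor
      · rintro (hm | ⟨kv, hkv, h1, rfl⟩)
        · rcases (PySem.Set.mem_add _ _ _).mp hm with hs | rfl
          · exact Or.inl hs
          · exact Or.inr ⟨p, by simp, hp, rfl⟩
        · exact Or.inr ⟨kv, by simp [hkv], h1, rfl⟩
      · rintro (hs | ⟨kv, hkv, h1, rfl⟩)
        · exact Or.inl ((PySem.Set.mem_add _ _ _).mpr (Or.inl hs))
        · rcases List.mem_cons.mp hkv with rfl | hkv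
          · exact Or.inl ((PySem.Set.mem_add _ _ _).mpr (Or.inr rfl))
          · exact Or.inr ⟨kv, hkv, h1, rfl⟩
    · rw [if_neg hp]
      constructor
      · rintro (hs | ⟨kv, hkv, h1, rfl⟩)
        · exact Or.inl hs
        · exact Or.inr ⟨kv, by simp [hkv], h1, rfl⟩
      · rintro (hs | ⟨kv, hkv, h1, rfl⟩)
        · exact Or.inl hs
        · rcases List.mem_cons.mp hkv with rfl | hkv
          · exact absurd h1 hp
          · exact Or.inr ⟨kv, hkv, h1, rfl⟩

-- membership in B's `found` set: some option mentions a default key equal to x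
lemma pv_mem_found (l : List String) (s : PySem.Set String) (x : String) :
    x ∈ l.foldl
        (fun s opt =>
          pvDefaultPairs.foldl
            (fun s kv => if PySem.Str.isIn kv.1 (PySem.Str.upper opt) then PySem.Set.add s kv.1 else s) s)
        s
      ↔ x ∈ s ∨ ∃ opt ∈ l, ∃ kv ∈ pvDefaultPairs,
          PySem.Str.isIn kv.1 (PySem.Str.upper opt) = true ∧ x = kv.1 := by
  induction l generalizing s with
  | nil => simp
  | cons a tl ih =>
    simp only [List.foldl_cons, ih, pv_mem_inner]
    constructor
    · rintro (⟨hs | ⟨kv, hkv, hin, rfl⟩⟩ | ⟨opt, hopt, kv, hkv, hin, rfl⟩)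
      · exact Or.inl hs
      · exact Or.inr ⟨a, by simp, kv, hkv, hin, rfl⟩
      · exact Or.inr ⟨opt, by simp [hopt], kv, hkv, hin, rfl⟩
    · rintro (hs | ⟨opt, hopt, kv, hkv, hin, rfl⟩)
      · exact Or.inl (Or.inl hs)
      · rcases List.mem_cons.mp hopt with rfl | hopt
        · exact Or.inl (Or.inr ⟨kv, hkv, hin, rfl⟩)
        · exact Or.inr ⟨opt, hopt, kv, hkv, hin, rfl⟩

-- for a default pair kv, the found-set lookup equals "some option mentions kv's key"
lemma pv_contains_found (l : List String) (kv : String × String) (hkv : kv ∈ pvDefaultPairs) :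
    PySem.Set.contains
        (l.foldl
          (fun s opt =>
            pvDefaultPairs.foldl
              (fun s kv => if PySem.Str.isIn kv.1 (PySem.Str.upper opt) then PySem.Set.add s kv.1 else s) s)
          PySem.Set.empty)
        kv.1
      = l.any (fun opt => PySem.Str.isIn kv.1 (PySem.Str.upper opt)) := by
  rcases hb : l.any (fun opt => PySem.Str.isIn kv.1 (PySem.Str.upper opt)) with _ | _
  · rw [Bool.eq_false_iff]
    intro hc
    have hm := (PySem.Set.contains_iff _ _).mp hc
    rcases (pv_mem_found l PySem.Set.empty kv.1).mp hm with hs | ⟨opt, hopt, kv', _, hin, heq⟩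
    · simp [PySem.Set.empty] at hs
    · rw [← heq] at hin
      have : l.any (fun opt => PySem.Str.isIn kv.1 (PySem.Str.upper opt)) = true :=
        List.any_eq_true.mpr ⟨opt, hopt, hin⟩
      rw [hb] at this; exact Bool.false_ne_true this
  · apply (PySem.Set.contains_iff _ _).mpr
    obtain ⟨opt, hopt, hin⟩ := List.any_eq_true.mp hb
    exact (pv_mem_found l PySem.Set.empty kv.1).mpr (Or.inr ⟨opt, hopt, kv, hkv, hin, rfl⟩)

-- the two programs agree for any internal option list
set_option maxHeartbeats 1600000 in
lemma pv_main (l : List String) :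
    pvDefaultPairs.foldl
      (fun acc kv => if !(PySem.Str.isIn kv.1 (PySem.Str.upper (PySem.Str.join " " l))) then acc ++ [kv.2] else acc)
      l
    = l ++ (pvDefaultPairs.filter
        (fun kv => !(PySem.Set.contains
          (l.foldl
            (fun s opt =>
              pvDefaultPairs.foldl
                (fun s kv => if PySem.Str.isIn kv.1 (PySem.Str.upper opt) then PySem.Set.add s kv.1 else s) s)
            PySem.Set.empty)
          kv.1))).map Prod.snd := by
  refine (PySem.List.foldl_append_if
      (fun kv : String × String => !(PySem.Str.isIn kv.1 (PySem.Str.upper (PySem.Str.join " " l))))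
      Prod.snd pvDefaultPairs l).trans ?_
  apply congrArg
  apply congrArg
  apply List.filter_congr
  intro kv hkv
  have hmem : kv = ("TILED", "TILED=YES") ∨ kv = ("NUM_THREADS", "NUM_THREADS=ALL_CPUS") ∨
      kv = ("BIGTIFF", "BIGTIFF=IF_SAFER") ∨ kv = ("COMPRESS", "COMPRESS=LZW") ∨
      kv = ("BLOCKXSIZE", "BLOCKXSIZE=256") ∨ kv = ("BLOCKYSIZE", "BLOCKYSIZE=256") := by
    simpa [pvDefaultPairs] using hkv
  have hkey : PySem.Str.isIn kv.1 (PySem.Str.upper (PySem.Str.join " " l))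
      = l.any (fun x => PySem.Str.isIn kv.1 (PySem.Str.upper x)) := by
    apply pv_isIn_upper_join
    · rcases hmem with rfl | rfl | rfl | rfl | rfl | rfl <;> decide
    · rcases hmem with rfl | rfl | rfl | rfl | rfl | rfl <;> decide
  rw [hkey, pv_contains_found l kv hkv]

-- ===== VERDICT (by name: the statement is the Claim_ definition above) =====
set_option maxHeartbeats 1000000 in
theorem get_default_creation_options_py_spec : Claim_equal_get_default_creation_options_py := by
  intro options _
  unfold Spec_get_default_creation_options_py get_default_creation_options_py get_default_creation_options_py_alt
  cases options with
  | none => exact pv_main []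
  | some l => exact pv_main l
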